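-- pv_equiv track=rewrite | github.com/raven-dev-ops/ETL-Identity-Data-Ruleset-Engine | src/etl_identity_engine/quality/exceptions.py | extract_exception_rows
-- ===== SOURCE A (Python) =====
-- def extract_exception_rows(rows: list[dict[str, str]]) -> dict[str, list[dict[str, str]]]:
--     invalid_dobs: list[dict[str, str]] = []
--     malformed_phones: list[dict[str, str]] = []
--     normalization_failures: list[dict[str, str]] = []
--
--     for row in rows:
--         record_context = {
--             "source_record_id": row.get("source_record_id", ""),
--             "person_entity_id": row.get("person_entity_id", ""),
--             "source_system": row.get("source_system", ""),
--         }
--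
--         raw_dob = row.get("dob", "").strip()
--         canonical_dob = row.get("canonical_dob", "").strip()
--         if raw_dob and not canonical_dob:
--             invalid_dobs.append(
--                 {
--                     **record_context,
--                     "field_name": "dob",
--                     "raw_value": raw_dob,
--                     "canonical_value": canonical_dob,
--                     "reason_code": "invalid_dob",
--                 }
--             )
--
--         raw_phone = row.get("phone", "").strip()
--         canonical_phone = row.get("canonical_phone", "").strip()
--         canonical_phone_digits = "".join(ch for ch in canonical_phone if ch.isdigit())
--         if raw_phone and len(canonical_phone_digits) != 10:
--             malformed_phones.append(
--                 {
--                     **record_context,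
--                     "field_name": "phone",
--                     "raw_value": raw_phone,
--                     "canonical_value": canonical_phone,
--                     "reason_code": "malformed_phone",
--                 }
--             )
--
--         raw_name = " ".join(
--             part.strip() for part in (row.get("first_name", ""), row.get("last_name", "")) if part.strip()
--         )
--         if raw_name and not row.get("canonical_name", "").strip():
--             normalization_failures.append(
--                 {
--                     **record_context,
--                     "field_name": "canonical_name",
--                     "raw_value": raw_name,
--                     "canonical_value": row.get("canonical_name", ""),
--                     "reason_code": "canonical_name_blank",
--                 }
--             )
--
--         raw_address = row.get("address", "").strip()
--         if raw_address and not row.get("canonical_address", "").strip():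
--             normalization_failures.append(
--                 {
--                     **record_context,
--                     "field_name": "canonical_address",
--                     "raw_value": raw_address,
--                     "canonical_value": row.get("canonical_address", ""),
--                     "reason_code": "canonical_address_blank",
--                 }
--             )
--
--     return {
--         "invalid_dobs": invalid_dobs,
--         "malformed_phones": malformed_phones,
--         "normalization_failures": normalization_failures,
--     }
-- ===== SOURCE B (Python) =====
-- # Three independent passes over rows (one per exception category) instead of one interleaved loop.
--
-- def _context(row):
--     return {
--         "source_record_id": row.get("source_record_id", ""),
--         "person_entity_id": row.get("person_entity_id", ""),
--         "source_system": row.get("source_system", ""),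
--     }
--
--
-- def _dob_exception(row):
--     raw = row.get("dob", "").strip()
--     canon = row.get("canonical_dob", "").strip()
--     if raw and not canon:
--         return {**_context(row), "field_name": "dob", "raw_value": raw,
--                 "canonical_value": canon, "reason_code": "invalid_dob"}
--     return None
--
--
-- def _phone_exception(row):
--     raw = row.get("phone", "").strip()
--     canon = row.get("canonical_phone", "").strip()
--     if raw and sum(ch.isdigit() for ch in canon) != 10:
--         return {**_context(row), "field_name": "phone", "raw_value": raw,
--                 "canonical_value": canon, "reason_code": "malformed_phone"}
--     return None
--
--
-- def _name_exception(row):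
--     parts = [p.strip() for p in (row.get("first_name", ""), row.get("last_name", "")) if p.strip()]
--     raw = " ".join(parts)
--     if raw and not row.get("canonical_name", "").strip():
--         return {**_context(row), "field_name": "canonical_name", "raw_value": raw,
--                 "canonical_value": row.get("canonical_name", ""), "reason_code": "canonical_name_blank"}
--     return None
--
--
-- def _address_exception(row):
--     raw = row.get("address", "").strip()
--     if raw and not row.get("canonical_address", "").strip():
--         return {**_context(row), "field_name": "canonical_address", "raw_value": raw,
--                 "canonical_value": row.get("canonical_address", ""), "reason_code": "canonical_address_blank"}
--     return None
--
--
-- def extract_exception_rows(rows):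
--     return {
--         "invalid_dobs": [e for r in rows for e in (_dob_exception(r),) if e is not None],
--         "malformed_phones": [e for r in rows for e in (_phone_exception(r),) if e is not None],
--         "normalization_failures": [e for r in rows
--                                    for e in (_name_exception(r), _address_exception(r))
--                                    if e is not None],
--     }
-- ===== Notes on version B (the rewrite author's own statement) =====
-- stated objective: simpler
-- what changed: Replaces the single interleaved loop mutating three accumulator lists with three independent passes over rows (a filter-map per category, with the normalization pass flattening the per-row name-then-address entries), each built by a small per-row helper returning the record or None.
import Mathlib
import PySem

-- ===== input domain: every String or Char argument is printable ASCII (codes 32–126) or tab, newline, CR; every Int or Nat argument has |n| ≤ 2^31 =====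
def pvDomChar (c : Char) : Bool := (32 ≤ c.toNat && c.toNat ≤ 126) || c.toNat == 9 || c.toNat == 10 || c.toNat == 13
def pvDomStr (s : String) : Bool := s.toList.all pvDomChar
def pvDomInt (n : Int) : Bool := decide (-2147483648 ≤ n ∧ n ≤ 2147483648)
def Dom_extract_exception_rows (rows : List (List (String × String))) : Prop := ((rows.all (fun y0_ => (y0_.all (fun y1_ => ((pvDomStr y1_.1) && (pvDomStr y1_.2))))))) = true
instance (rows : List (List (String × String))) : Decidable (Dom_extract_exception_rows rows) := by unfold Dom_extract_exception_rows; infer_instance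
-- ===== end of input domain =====

-- B is a different decomposition of A (three independent passes, one per category, instead of one
-- interleaved loop with three accumulators); same return value, no speed claim.

-- ===== PORT A =====
-- row.get(k, "") on the association list (first match, "" if absent); used by both ports like Python's dict.get
def pvGet (row : List (String × String)) (k : String) : String :=
  ((row.find? (fun p => p.1 == k)).map Prod.snd).getD ""

-- the body of A's single for-loop over rows, threading the three accumulator lists
def pvStepA (st : List (List (String × String)) × List (List (String × String)) × List (List (String × String)))
    (row : List (String × String)) :
    List (List (String × String)) × List (List (String × String)) × List (List (String × String)) :=
  let inv := st.1
  let mal := st.2.1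
  let norm := st.2.2
  let ctx : List (String × String) :=
    [("source_record_id", pvGet row "source_record_id"),
     ("person_entity_id", pvGet row "person_entity_id"),
     ("source_system", pvGet row "source_system")]
  let raw_dob := PySem.Str.strip (pvGet row "dob")
  let canonical_dob := PySem.Str.strip (pvGet row "canonical_dob")
  let inv := if raw_dob ≠ "" ∧ canonical_dob = "" then
      inv ++ [ctx ++ [("field_name", "dob"), ("raw_value", raw_dob),
                      ("canonical_value", canonical_dob), ("reason_code", "invalid_dob")]]
    else inv
  let raw_phone := PySem.Str.strip (pvGet row "phone")
  let canonical_phone := PySem.Str.strip (pvGet row "canonical_phone")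
  -- "".join(ch for ch in canonical_phone if ch.isdigit()) kept as its character list
  let canonical_phone_digits := canonical_phone.toList.filter (fun c => PySem.Chars.isdigit c)
  let mal := if raw_phone ≠ "" ∧ canonical_phone_digits.length ≠ 10 then
      mal ++ [ctx ++ [("field_name", "phone"), ("raw_value", raw_phone),
                      ("canonical_value", canonical_phone), ("reason_code", "malformed_phone")]]
    else mal
  let raw_name := PySem.Str.join " "
    (([pvGet row "first_name", pvGet row "last_name"].map PySem.Str.strip).filter (fun p => p ≠ ""))
  let norm := if raw_name ≠ "" ∧ PySem.Str.strip (pvGet row "canonical_name") = "" then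
      norm ++ [ctx ++ [("field_name", "canonical_name"), ("raw_value", raw_name),
                       ("canonical_value", pvGet row "canonical_name"), ("reason_code", "canonical_name_blank")]]
    else norm
  let raw_address := PySem.Str.strip (pvGet row "address")
  let norm := if raw_address ≠ "" ∧ PySem.Str.strip (pvGet row "canonical_address") = "" then
      norm ++ [ctx ++ [("field_name", "canonical_address"), ("raw_value", raw_address),
                       ("canonical_value", pvGet row "canonical_address"), ("reason_code", "canonical_address_blank")]]
    else norm
  (inv, mal, norm)

def extract_exception_rows (rows : List (List (String × String))) : List (String × List (List (String × String))) :=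
  let st := rows.foldl pvStepA ([], [], [])
  [("invalid_dobs", st.1), ("malformed_phones", st.2.1), ("normalization_failures", st.2.2)]

-- ===== PORT B =====
def pvCtxB (row : List (String × String)) : List (String × String) :=
  [("source_record_id", pvGet row "source_record_id"),
   ("person_entity_id", pvGet row "person_entity_id"),
   ("source_system", pvGet row "source_system")]

def pvDobExc? (row : List (String × String)) : Option (List (String × String)) :=
  let raw := PySem.Str.strip (pvGet row "dob")
  let canon := PySem.Str.strip (pvGet row "canonical_dob")
  if raw ≠ "" ∧ canon = "" then
    some (pvCtxB row ++ [("field_name", "dob"), ("raw_value", raw),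
                         ("canonical_value", canon), ("reason_code", "invalid_dob")])
  else none

def pvPhoneExc? (row : List (String × String)) : Option (List (String × String)) :=
  let raw := PySem.Str.strip (pvGet row "phone")
  let canon := PySem.Str.strip (pvGet row "canonical_phone")
  -- sum(ch.isdigit() for ch in canon)
  if raw ≠ "" ∧ canon.toList.countP (fun c => PySem.Chars.isdigit c) ≠ 10 then
    some (pvCtxB row ++ [("field_name", "phone"), ("raw_value", raw),
                         ("canonical_value", canon), ("reason_code", "malformed_phone")])
  else none

def pvNameExc? (row : List (String × String)) : Option (List (String × String)) :=
  let parts := ([pvGet row "first_name", pvGet row "last_name"].map PySem.Str.strip).filter (fun p => p ≠ "")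
  let raw := PySem.Str.join " " parts
  if raw ≠ "" ∧ PySem.Str.strip (pvGet row "canonical_name") = "" then
    some (pvCtxB row ++ [("field_name", "canonical_name"), ("raw_value", raw),
                         ("canonical_value", pvGet row "canonical_name"), ("reason_code", "canonical_name_blank")])
  else none

def pvAddrExc? (row : List (String × String)) : Option (List (String × String)) :=
  let raw := PySem.Str.strip (pvGet row "address")
  if raw ≠ "" ∧ PySem.Str.strip (pvGet row "canonical_address") = "" then
    some (pvCtxB row ++ [("field_name", "canonical_address"), ("raw_value", raw),
                         ("canonical_value", pvGet row "canonical_address"), ("reason_code", "canonical_address_blank")])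
  else none

def extract_exception_rows_alt (rows : List (List (String × String))) : List (String × List (List (String × String))) :=
  [("invalid_dobs", rows.flatMap (fun r => (pvDobExc? r).toList)),
   ("malformed_phones", rows.flatMap (fun r => (pvPhoneExc? r).toList)),
   ("normalization_failures", rows.flatMap (fun r => (pvNameExc? r).toList ++ (pvAddrExc? r).toList))]

-- ===== PRECONDITION & SPEC =====
def Spec_extract_exception_rows (rows : List (List (String × String))) (out : List (String × List (List (String × String)))) : Prop := out = extract_exception_rows_alt rows
instance (rows : List (List (String × String))) (out : List (String × List (List (String × String)))) : Decidable (Spec_extract_exception_rows rows out) := by unfold Spec_extract_exception_rows; infer_instance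

-- ===== CLAIM (what is proved, stated in full; the proofs are below) =====
def Claim_equal_extract_exception_rows : Prop := ∀ (rows : List (List (String × String))), Dom_extract_exception_rows rows → Spec_extract_exception_rows rows (extract_exception_rows rows)

-- ===== LEMMAS AND PROOFS =====
-- one iteration of A's loop appends exactly B's per-row entries to the three accumulators
lemma pvStepA_eq (inv mal norm : List (List (String × String))) (row : List (String × String)) :
    pvStepA (inv, mal, norm) row =
      (inv ++ (pvDobExc? row).toList, mal ++ (pvPhoneExc? row).toList,
       norm ++ ((pvNameExc? row).toList ++ (pvAddrExc? row).toList)) := by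
  simp only [pvStepA, pvDobExc?, pvPhoneExc?, pvNameExc?, pvAddrExc?, pvCtxB,
    List.countP_eq_length_filter]
  split_ifs <;> simp

-- A's fold, started from arbitrary accumulators, produces B's three passes appended to them
lemma pvFoldA_eq (rows : List (List (String × String))) (inv mal norm : List (List (String × String))) :
    rows.foldl pvStepA (inv, mal, norm) =
      (inv ++ rows.flatMap (fun r => (pvDobExc? r).toList),
       mal ++ rows.flatMap (fun r => (pvPhoneExc? r).toList),
       norm ++ rows.flatMap (fun r => (pvNameExc? r).toList ++ (pvAddrExc? r).toList)) := by
  induction rows generalizing inv mal norm with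
  | nil => simp
  | cons r rs ih =>
    simp only [List.foldl_cons, pvStepA_eq, ih, List.flatMap_cons, List.append_assoc]

-- ===== VERDICT (by name: the statement is the Claim_ definition above) =====
theorem extract_exception_rows_spec : Claim_equal_extract_exception_rows := by
  intro rows _
  unfold Spec_extract_exception_rows extract_exception_rows extract_exception_rows_alt
  simp [pvFoldA_eq]
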